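-- pv_equiv track=rewrite | github.com/DANU011/CodingTest | DANU/python/1864.py | octopus_to_decimal
-- ===== SOURCE A (Python) =====
-- def octopus_to_decimal(octopus_num):
--     dict_octopus = { '-' : 0,
--                      '\\' : 1,
--                      '(' : 2,
--                      '@' : 3,
--                      '?' : 4,
--                      '>' : 5,
--                      '&' : 6,
--                      '%' : 7,
--                      '/' : -1 }
--     decimal_num = 0
--     for digit in octopus_num:
--         if digit in dict_octopus:
--             decimal_num = (decimal_num * 8) + dict_octopus[digit]
--
--     return decimal_num
-- ===== SOURCE B (Python) =====
-- def octopus_to_decimal(octopus_num):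
--     symbols = {'-': 0, '\\': 1, '(': 2, '@': 3, '?': 4,
--                '>': 5, '&': 6, '%': 7, '/': -1}
--     values = [symbols[c] for c in octopus_num if c in symbols]
--     n = len(values)
--     return sum(v * 8 ** (n - 1 - i) for i, v in enumerate(values))
-- ===== Notes on version B (the rewrite author's own statement) =====
-- stated objective: alternative
-- what changed: Replaced A's single-pass Horner accumulation (total = total*8 + value) over the raw string by a two-pass decomposition: first filter/map the string to the list of digit values, then return the explicit positional weighted sum sum(v * 8**(n-1-i)).
import Mathlib
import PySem

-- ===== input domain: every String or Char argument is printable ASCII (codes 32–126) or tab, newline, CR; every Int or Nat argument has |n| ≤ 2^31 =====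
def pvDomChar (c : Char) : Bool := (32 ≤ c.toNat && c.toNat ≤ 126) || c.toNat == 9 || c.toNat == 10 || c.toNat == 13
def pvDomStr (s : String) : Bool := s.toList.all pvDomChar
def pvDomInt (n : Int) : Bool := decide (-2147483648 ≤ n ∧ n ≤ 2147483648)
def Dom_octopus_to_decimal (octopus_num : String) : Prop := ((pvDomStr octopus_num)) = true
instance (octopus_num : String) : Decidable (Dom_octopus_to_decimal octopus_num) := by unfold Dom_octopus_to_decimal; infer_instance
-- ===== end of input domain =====

-- B replaces A's one-pass Horner accumulation by a filter-then-positional-weighted-sum decomposition (objective: alternative).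

-- ===== PORT A =====
def pvDictOctopus : PySem.Dict Char Int :=
  PySem.Dict.ofList [('-', 0), ('\\', 1), ('(', 2), ('@', 3), ('?', 4),
                     ('>', 5), ('&', 6), ('%', 7), ('/', -1)]

def octopus_to_decimal (octopus_num : String) : Int :=
  octopus_num.toList.foldl
    (fun decimal_num digit =>
      match pvDictOctopus.get? digit with
      | some v => decimal_num * 8 + v
      | none => decimal_num) 0

-- ===== PORT B =====
def octopus_to_decimal_alt (octopus_num : String) : Int :=
  let values : List Int := octopus_num.toList.filterMap (fun c => pvDictOctopus.get? c)
  let n : Int := values.length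
  ((PySem.List.enumerate values).map (fun p => p.2 * (8 : Int) ^ ((n - 1 - p.1).toNat))).sum

-- ===== PRECONDITION & SPEC =====
def Spec_octopus_to_decimal (octopus_num : String) (out : Int) : Prop := out = octopus_to_decimal_alt octopus_num
instance (octopus_num : String) (out : Int) : Decidable (Spec_octopus_to_decimal octopus_num out) := by unfold Spec_octopus_to_decimal; infer_instance

-- ===== CLAIM (what is proved, stated in full; the proofs are below) =====
def Claim_equal_octopus_to_decimal : Prop := ∀ (octopus_num : String), Dom_octopus_to_decimal octopus_num → Spec_octopus_to_decimal octopus_num (octopus_to_decimal octopus_num)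

-- ===== LEMMAS AND PROOFS =====

-- A's guarded fold is the Horner fold over the filtered value list.
theorem pv_fold_filterMap (l : List Char) (a : Int) :
    l.foldl (fun decimal_num digit =>
        match pvDictOctopus.get? digit with
        | some v => decimal_num * 8 + v
        | none => decimal_num) a
      = (l.filterMap (fun c => pvDictOctopus.get? c)).foldl (fun acc v => acc * 8 + v) a := by
  induction l generalizing a with
  | nil => rfl
  | cons c cs ih =>
    simp only [List.foldl_cons, List.filterMap_cons]
    cases h : pvDictOctopus.get? c with
    | none => simp [ih]
    | some v => simp [ih]

-- Horner fold equals the positional weighted sum (generalized over the enumerate start).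
theorem pv_horner_eq_wsum (vs : List Int) (a s : Int) :
    vs.foldl (fun acc v => acc * 8 + v) a
      = a * 8 ^ vs.length
        + ((PySem.List.enumerate vs s).map
            (fun p => p.2 * (8 : Int) ^ ((s + vs.length - 1 - p.1).toNat))).sum := by
  induction vs generalizing a s with
  | nil => simp
  | cons v vs ih =>
    simp only [List.foldl_cons, PySem.List.enumerate_cons, List.map_cons, List.sum_cons,
      List.length_cons]
    rw [ih (a * 8 + v) (s + 1)]
    have h1 : ((s + (vs.length + 1 : Nat) - 1 - s).toNat) = vs.length := by
      push_cast; omega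
    have h2 : ∀ p : Int × Int,
        (s + 1 + (vs.length : Int) - 1 - p.1).toNat = (s + ((vs.length + 1 : Nat) : Int) - 1 - p.1).toNat := by
      intro p; push_cast; omega
    have h3 : ((PySem.List.enumerate vs (s + 1)).map
          (fun p => p.2 * (8 : Int) ^ ((s + 1 + vs.length - 1 - p.1).toNat))).sum
        = ((PySem.List.enumerate vs (s + 1)).map
          (fun p => p.2 * (8 : Int) ^ ((s + ((vs.length + 1 : Nat) : Int) - 1 - p.1).toNat))).sum := by
      congr 1
      exact List.map_congr_left (fun p _ => by rw [h2 p])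
    rw [h3, h1, pow_succ]
    ring

-- ===== VERDICT (by name: the statement is the Claim_ definition above) =====
theorem octopus_to_decimal_spec : Claim_equal_octopus_to_decimal := by
  intro s _
  unfold Spec_octopus_to_decimal octopus_to_decimal octopus_to_decimal_alt
  rw [pv_fold_filterMap, pv_horner_eq_wsum _ 0 0]
  simp
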